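-- pv_equiv track=rewrite | github.com/mlukacsko/GaTech | CS7637_KBAI/Mini Project 5/MonsterDiagnosisAgent/MonsterDiagnosisAgent.py | matches_patient_symptoms
-- ===== SOURCE A (Python) =====
-- from collections import Counter, defaultdict
--
-- def matches_patient_symptoms(disease_combo, disease_symptoms, patient):
--     combined_effects = defaultdict(int)
--
--     for disease in disease_combo:
--         for vitamin, effect in disease_symptoms[disease].items():
--             if effect == "+":
--                 combined_effects[vitamin] += 1
--             elif effect == "-":
--                 combined_effects[vitamin] -= 1
--
--     for vitamin, patient_symptom in patient.items():
--         net_effect = combined_effects[vitamin]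
--         if patient_symptom == "+" and net_effect <= 0:
--             return False
--         elif patient_symptom == "-" and net_effect >= 0:
--             return False
--         elif patient_symptom == "0" and net_effect != 0:
--             return False
--
--     return True
-- ===== SOURCE B (Python) =====
-- def matches_patient_symptoms(disease_combo, disease_symptoms, patient):
--     for vitamin, patient_symptom in patient.items():
--         net_effect = 0
--         for disease in disease_combo:
--             effect = disease_symptoms[disease].get(vitamin)
--             if effect == "+":
--                 net_effect += 1
--             elif effect == "-":
--                 net_effect -= 1
--         if patient_symptom == "+" and net_effect <= 0:
--             return False
--         elif patient_symptom == "-" and net_effect >= 0: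
--             return False
--         elif patient_symptom == "0" and net_effect != 0:
--             return False
--     return True
-- ===== Notes on version B (the rewrite author's own statement) =====
-- stated objective: alternative
-- what changed: B drops the combined_effects defaultdict aggregate entirely: for each patient vitamin it computes the net effect on the fly by scanning the disease combo with dict.get, instead of A's build-an-aggregate-index-then-check pass.
import Mathlib
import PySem

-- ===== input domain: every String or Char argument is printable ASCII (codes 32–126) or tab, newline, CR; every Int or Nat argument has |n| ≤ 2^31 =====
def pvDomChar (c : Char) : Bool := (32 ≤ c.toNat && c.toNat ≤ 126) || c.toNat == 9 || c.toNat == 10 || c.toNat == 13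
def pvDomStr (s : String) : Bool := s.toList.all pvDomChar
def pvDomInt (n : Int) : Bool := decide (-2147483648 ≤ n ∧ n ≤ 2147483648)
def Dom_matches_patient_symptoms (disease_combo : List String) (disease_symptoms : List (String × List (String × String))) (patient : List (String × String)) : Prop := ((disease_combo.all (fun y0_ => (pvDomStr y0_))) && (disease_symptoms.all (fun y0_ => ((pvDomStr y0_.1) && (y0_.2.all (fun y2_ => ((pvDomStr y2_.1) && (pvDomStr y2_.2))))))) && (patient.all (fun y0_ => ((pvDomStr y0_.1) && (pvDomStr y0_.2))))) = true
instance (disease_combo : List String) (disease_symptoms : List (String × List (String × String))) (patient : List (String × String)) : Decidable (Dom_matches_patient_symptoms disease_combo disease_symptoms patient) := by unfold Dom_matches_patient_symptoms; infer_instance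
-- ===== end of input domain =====

-- B replaces A's aggregate defaultdict of combined effects by a direct per-patient-vitamin scan of the disease combo (objective: alternative; return value only, no mutation).

-- ===== PORT A =====
-- disease_symptoms[disease]: first-match lookup; a missing key is a Python KeyError, excluded by Pre_ (the [] default is never reached there)
def pvRow (disease_symptoms : List (String × List (String × String))) (d : String) : List (String × String) :=
  (disease_symptoms.lookup d).getD []

-- the second loop of A, with its early returns, as structural recursion over patient.items()
def pvCheckA (ce : PySem.Dict String Int) : List (String × String) → Bool
  | [] => true
  | (v, s) :: rest =>
    let n := ce.getD v 0
    if s == "+" && decide (n ≤ 0) then false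
    else if s == "-" && decide (n ≥ 0) then false
    else if s == "0" && !(decide (n = 0)) then false
    else pvCheckA ce rest

def matches_patient_symptoms (disease_combo : List String) (disease_symptoms : List (String × List (String × String))) (patient : List (String × String)) : Bool :=
  let combined_effects : PySem.Dict String Int :=
    disease_combo.foldl (fun ce disease =>
      (pvRow disease_symptoms disease).foldl (fun ce p =>
        if p.2 == "+" then ce.modify p.1 0 (· + 1)
        else if p.2 == "-" then ce.modify p.1 0 (· - 1)
        else ce) ce)
      PySem.Dict.empty
  pvCheckA combined_effects patient

-- ===== PORT B =====
-- net_effect for one patient vitamin: scan disease_combo; disease_symptoms[disease].get(vitamin) is first-match lookup returning none when absent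
def pvNetB (disease_combo : List String) (disease_symptoms : List (String × List (String × String))) (v : String) : Int :=
  disease_combo.foldl (fun acc d =>
    let effect := (pvRow disease_symptoms d).lookup v
    if effect == some "+" then acc + 1
    else if effect == some "-" then acc - 1
    else acc) 0

def pvCheckB (disease_combo : List String) (disease_symptoms : List (String × List (String × String))) : List (String × String) → Bool
  | [] => true
  | (v, s) :: rest =>
    let n := pvNetB disease_combo disease_symptoms v
    if s == "+" && decide (n ≤ 0) then false
    else if s == "-" && decide (n ≥ 0) then false
    else if s == "0" && !(decide (n = 0)) then false
    else pvCheckB disease_combo disease_symptoms rest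

def matches_patient_symptoms_alt (disease_combo : List String) (disease_symptoms : List (String × List (String × String))) (patient : List (String × String)) : Bool :=
  pvCheckB disease_combo disease_symptoms patient

-- ===== PRECONDITION & SPEC =====
-- Pre_ excludes inputs where some disease in disease_combo is missing from disease_symptoms (Python A raises KeyError there), and association lists with duplicate vitamin keys inside one disease's symptom dict, which no Python dict input can have.
def Pre_matches_patient_symptoms (disease_combo : List String) (disease_symptoms : List (String × List (String × String))) (patient : List (String × String)) : Prop :=
  (∀ d ∈ disease_combo, d ∈ disease_symptoms.map Prod.fst) ∧
  (∀ p ∈ disease_symptoms, (p.2.map Prod.fst).Nodup)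
instance (disease_combo : List String) (disease_symptoms : List (String × List (String × String))) (patient : List (String × String)) : Decidable (Pre_matches_patient_symptoms disease_combo disease_symptoms patient) := by unfold Pre_matches_patient_symptoms; infer_instance

def pvWitness_matches_patient_symptoms : List String × (List (String × List (String × String))) × (List (String × String)) :=
  (["flu"], [("flu", [("A", "+"), ("B", "-")])], [("A", "+"), ("B", "-"), ("C", "0")])

def Spec_matches_patient_symptoms (disease_combo : List String) (disease_symptoms : List (String × List (String × String))) (patient : List (String × String)) (out : Bool) : Prop := out = matches_patient_symptoms_alt disease_combo disease_symptoms patient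
instance (disease_combo : List String) (disease_symptoms : List (String × List (String × String))) (patient : List (String × String)) (out : Bool) : Decidable (Spec_matches_patient_symptoms disease_combo disease_symptoms patient out) := by unfold Spec_matches_patient_symptoms; infer_instance

-- ===== CLAIM (what is proved, stated in full; the proofs are below) =====
def Claim_equal_matches_patient_symptoms : Prop := ∀ (disease_combo : List String) (disease_symptoms : List (String × List (String × String))) (patient : List (String × String)), Dom_matches_patient_symptoms disease_combo disease_symptoms patient → Pre_matches_patient_symptoms disease_combo disease_symptoms patient → Spec_matches_patient_symptoms disease_combo disease_symptoms patient (matches_patient_symptoms disease_combo disease_symptoms patient)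


-- ===== LEMMAS AND PROOFS =====

-- the contribution of one disease's row to pvNetB at vitamin v (exactly B's per-disease step applied to 0)
def pvRowContrib (row : List (String × String)) (v : String) : Int :=
  let effect := row.lookup v
  if effect == some "+" then 1 else if effect == some "-" then -1 else 0

theorem lookup_eq_none_of_not_mem {row : List (String × String)} {v : String}
    (h : v ∉ row.map Prod.fst) : row.lookup v = none := by
  induction row with
  | nil => rfl
  | cons p rest ih =>
    cases p with
    | mk k e =>
      simp only [List.map_cons, List.mem_cons, not_or] at h
      have hb : (v == k) = false := beq_eq_false_iff_ne.mpr h.1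
      simp [List.lookup, hb, ih h.2]

theorem pvRow_nodup {disease_symptoms : List (String × List (String × String))} {d : String}
    (h : ∀ p ∈ disease_symptoms, (p.2.map Prod.fst).Nodup) :
    ((pvRow disease_symptoms d).map Prod.fst).Nodup := by
  induction disease_symptoms with
  | nil => simp [pvRow]
  | cons p rest ih =>
    cases p with
    | mk k row =>
      simp only [pvRow, List.lookup]
      cases hdk : d == k with
      | true =>
        simpa [hdk] using h (k, row) (by simp)
      | false =>
        simpa [hdk] using ih (fun q hq => h q (List.mem_cons_of_mem _ hq))

-- inner loop of A over one row: the effect on getD v 0 is exactly pvRowContrib (needs nodup row keys)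
theorem inner_foldl_getD (row : List (String × String)) (v : String)
    (hnd : (row.map Prod.fst).Nodup) (ce : PySem.Dict String Int) :
    (row.foldl (fun ce p =>
        if p.2 == "+" then ce.modify p.1 0 (· + 1)
        else if p.2 == "-" then ce.modify p.1 0 (· - 1)
        else ce) ce).getD v 0 = ce.getD v 0 + pvRowContrib row v := by
  induction row generalizing ce with
  | nil => simp [pvRowContrib]
  | cons p rest ih =>
    cases p with
    | mk k e =>
      simp only [List.map_cons, List.nodup_cons] at hnd
      obtain ⟨hk, hrest⟩ := hnd
      simp only [List.foldl_cons]
      by_cases hv : v = k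
      · subst hv
        have hnone : rest.lookup v = none :=
          lookup_eq_none_of_not_mem (by simpa using hk)
        have hr : pvRowContrib rest v = 0 := by simp [pvRowContrib, hnone]
        have hc : pvRowContrib ((v, e) :: rest) v =
            (if e == "+" then 1 else if e == "-" then -1 else 0) := by
          simp [pvRowContrib, List.lookup]
        rw [hc]
        split_ifs with h1 h2
        · rw [ih hrest, hr, PySem.Dict.getD_modify_self]; ring
        · rw [ih hrest, hr, PySem.Dict.getD_modify_self]; ring
        · rw [ih hrest, hr]
      · have hb : (v == k) = false := beq_eq_false_iff_ne.mpr hv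
        have hc : pvRowContrib ((k, e) :: rest) v = pvRowContrib rest v := by
          simp [pvRowContrib, List.lookup, hb]
        rw [hc]
        split_ifs with h1 h2
        · rw [ih hrest, PySem.Dict.getD_modify_of_ne _ 0 _ hv]
        · rw [ih hrest, PySem.Dict.getD_modify_of_ne _ 0 _ hv]
        · rw [ih hrest]

-- B's inner foldl shifts: starting accumulator adds on
theorem netB_foldl_shift (disease_combo : List String)
    (disease_symptoms : List (String × List (String × String))) (v : String) (a : Int) :
    disease_combo.foldl (fun acc d =>
      let effect := (pvRow disease_symptoms d).lookup v
      if effect == some "+" then acc + 1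
      else if effect == some "-" then acc - 1
      else acc) a = a + pvNetB disease_combo disease_symptoms v := by
  induction disease_combo generalizing a with
  | nil => simp [pvNetB]
  | cons d rest ih =>
    simp only [pvNetB, List.foldl_cons]
    rw [ih, ih]
    split_ifs <;> ring

theorem netB_cons (d : String) (rest : List String)
    (disease_symptoms : List (String × List (String × String))) (v : String) :
    pvNetB (d :: rest) disease_symptoms v =
      pvRowContrib (pvRow disease_symptoms d) v + pvNetB rest disease_symptoms v := by
  have h1 : pvNetB (d :: rest) disease_symptoms v =
      rest.foldl (fun acc d' =>
        let effect := (pvRow disease_symptoms d').lookup v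
        if effect == some "+" then acc + 1
        else if effect == some "-" then acc - 1
        else acc)
        (let effect := (pvRow disease_symptoms d).lookup v
         if effect == some "+" then (0 : Int) + 1
         else if effect == some "-" then (0 : Int) - 1
         else 0) := rfl
  rw [h1, netB_foldl_shift]
  simp only [pvRowContrib]
  split_ifs <;> ring

-- A's aggregate lookup equals B's direct scan
theorem combined_getD_eq_netB (disease_combo : List String)
    (disease_symptoms : List (String × List (String × String))) (v : String)
    (hnd : ∀ p ∈ disease_symptoms, (p.2.map Prod.fst).Nodup) :
    ∀ ce : PySem.Dict String Int,
    (disease_combo.foldl (fun ce disease =>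
        (pvRow disease_symptoms disease).foldl (fun ce p =>
          if p.2 == "+" then ce.modify p.1 0 (· + 1)
          else if p.2 == "-" then ce.modify p.1 0 (· - 1)
          else ce) ce) ce).getD v 0
      = ce.getD v 0 + pvNetB disease_combo disease_symptoms v := by
  induction disease_combo with
  | nil => intro ce; simp [pvNetB]
  | cons d rest ih =>
    intro ce
    simp only [List.foldl_cons]
    rw [ih, inner_foldl_getD _ _ (pvRow_nodup hnd), netB_cons]
    ring

theorem check_eq (disease_combo : List String)
    (disease_symptoms : List (String × List (String × String)))
    (ce : PySem.Dict String Int)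
    (h : ∀ v, ce.getD v 0 = pvNetB disease_combo disease_symptoms v) :
    ∀ patient : List (String × String),
      pvCheckA ce patient = pvCheckB disease_combo disease_symptoms patient := by
  intro patient
  induction patient with
  | nil => rfl
  | cons p rest ih =>
    cases p with
    | mk v s =>
      simp only [pvCheckA, pvCheckB, h v, ih]

-- ===== VERDICT (by name: the statement is the Claim_ definition above) =====
theorem matches_patient_symptoms_spec : Claim_equal_matches_patient_symptoms := by
  intro disease_combo disease_symptoms patient _ hpre
  unfold Spec_matches_patient_symptoms matches_patient_symptoms matches_patient_symptoms_alt
  exact check_eq disease_combo disease_symptoms _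
    (fun v => by rw [combined_getD_eq_netB disease_combo disease_symptoms v hpre.2]; simp) patient
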